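-- pv_equiv track=rewrite | github.com/SP1029/Import-NLP-SemEval-2024-Task-10 | utilities.py | remove_puntuations
-- ===== SOURCE A (Python) =====
-- import string
--
-- def remove_puntuations(txt):
--     punct = set(string.punctuation)
--     txt = " ".join(txt.split("."))
--     txt = " ".join(txt.split("!"))
--     txt = " ".join(txt.split("?"))
--     txt = " ".join(txt.split(":"))
--     txt = " ".join(txt.split(";"))
--
--     txt = "".join(ch for ch in txt if ch not in punct)
--     return txt
-- ===== SOURCE B (Python) =====
-- import string
--
-- def remove_puntuations(txt):
--     # One pass: '.!?:;' become spaces, other punctuation is dropped, rest kept.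
--     punct = set(string.punctuation)
--     space_for = set(".!?:;")
--     out = []
--     for ch in txt:
--         if ch in space_for:
--             out.append(" ")
--         elif ch in punct:
--             continue
--         else:
--             out.append(ch)
--     return "".join(out)
-- ===== Notes on version B (the rewrite author's own statement) =====
-- stated objective: simpler
-- what changed: Replaced A's six sequential whole-string passes (five split/join rounds plus a final filter) by a single per-character loop that emits a space for the five sentence-punctuation characters, drops other punctuation, and keeps everything else.
import Mathlib
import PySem

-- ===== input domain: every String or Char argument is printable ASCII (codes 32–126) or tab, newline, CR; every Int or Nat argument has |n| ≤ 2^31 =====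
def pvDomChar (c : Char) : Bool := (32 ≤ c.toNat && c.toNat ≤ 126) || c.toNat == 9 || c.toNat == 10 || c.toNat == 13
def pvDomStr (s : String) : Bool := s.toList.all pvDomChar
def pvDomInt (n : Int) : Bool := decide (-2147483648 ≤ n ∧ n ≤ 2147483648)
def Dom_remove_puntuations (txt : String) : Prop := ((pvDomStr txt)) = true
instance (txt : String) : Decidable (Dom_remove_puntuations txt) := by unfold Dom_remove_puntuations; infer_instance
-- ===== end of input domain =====

-- B replaces A's six sequential whole-string passes by one per-character classification pass (simpler).

-- string.punctuation
def pyPunctuation : List Char := "!\"#$%&'()*+,-./:;<=>?@[\\]^_`{|}~".toList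

-- ===== PORT A =====
def remove_puntuations (txt : String) : String :=
  let punct : PySem.Set Char := PySem.Set.ofList pyPunctuation
  let t1 := PySem.Chars.join [' '] (PySem.Chars.splitOn txt.toList ['.'])
  let t2 := PySem.Chars.join [' '] (PySem.Chars.splitOn t1 ['!'])
  let t3 := PySem.Chars.join [' '] (PySem.Chars.splitOn t2 ['?'])
  let t4 := PySem.Chars.join [' '] (PySem.Chars.splitOn t3 [':'])
  let t5 := PySem.Chars.join [' '] (PySem.Chars.splitOn t4 [';'])
  String.ofList (t5.filter (fun ch => !(PySem.Set.contains punct ch)))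

-- ===== PORT B =====
def remove_puntuations_alt (txt : String) : String :=
  let punct : PySem.Set Char := PySem.Set.ofList pyPunctuation
  let spaceFor : PySem.Set Char := PySem.Set.ofList ".!?:;".toList
  String.ofList (txt.toList.flatMap (fun ch =>
    if PySem.Set.contains spaceFor ch then [' ']
    else if PySem.Set.contains punct ch then []
    else [ch]))

-- ===== PRECONDITION & SPEC =====
def Spec_remove_puntuations (txt : String) (out : String) : Prop := out = remove_puntuations_alt txt
instance (txt : String) (out : String) : Decidable (Spec_remove_puntuations txt out) := by unfold Spec_remove_puntuations; infer_instance

-- ===== CLAIM (what is proved, stated in full; the proofs are below) =====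
def Claim_equal_remove_puntuations : Prop := ∀ (txt : String), Dom_remove_puntuations txt → Spec_remove_puntuations txt (remove_puntuations txt)

-- ===== LEMMAS AND PROOFS =====

-- " ".join(s.split(sep)) with ys ++ [z] shaped accumulator
theorem pv_join_append_singleton (sep z : List Char) (ys : List (List Char)) :
    PySem.Chars.join sep (ys ++ [z]) =
      PySem.Chars.join sep ys ++ (if ys.isEmpty then [] else sep) ++ z := by
  induction ys with
  | nil => simp [PySem.Chars.join, List.intercalate]
  | cons y ys ih =>
    cases ys with
    | nil => simp [PySem.Chars.join, List.intercalate, List.intersperse]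
    | cons y' ys' =>
      simp only [List.cons_append] at *
      rw [PySem.Chars.join_cons_cons, PySem.Chars.join_cons_cons, ih]
      simp

def pvSub (c x : Char) : Char := if x = c then ' ' else x

-- invariant of the fuelled split loop, seen through the final join
theorem pv_go_join (c : Char) :
    ∀ (fuel : Nat) (l cur : List Char) (acc : List (List Char)), l.length ≤ fuel →
    PySem.Chars.join [' '] (PySem.Chars.splitOn.go [c] fuel l cur acc) =
      PySem.Chars.join [' '] acc.reverse ++ (if acc.isEmpty then [] else [' ']) ++
        cur.reverse ++ l.map (pvSub c) := by
  intro fuel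
  induction fuel with
  | zero =>
    intro l cur acc h
    have hl : l = [] := List.eq_nil_of_length_eq_zero (Nat.le_zero.mp h)
    subst hl
    rw [PySem.Chars.splitOn.go.eq_def]
    simp [pv_join_append_singleton]
  | succ fuel ih =>
    intro l cur acc h
    cases l with
    | nil =>
      rw [PySem.Chars.splitOn.go.eq_def]
      simp [pv_join_append_singleton]
    | cons x rest =>
      rw [PySem.Chars.splitOn.go.eq_def]
      simp only [List.isPrefixOf, Bool.and_true]
      by_cases hx : c = x
      · subst hx
        simp only [beq_self_eq_true, if_pos, List.length_cons] at *
        have hd : List.drop (List.length ([] : List Char) + 1) (c :: rest) = rest := by simp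
        rw [hd, ih rest [] (cur.reverse :: acc) (by omega)]
        simp only [List.reverse_cons]
        rw [pv_join_append_singleton]
        have hsub : pvSub c c = ' ' := by simp [pvSub]
        simp only [List.map_cons, hsub, List.reverse_nil, List.isEmpty_cons,
          List.isEmpty_reverse]
        split_ifs <;> simp_all
      · rw [if_neg (by simpa using hx)]
        have hlen : rest.length ≤ fuel := by simp at h; omega
        rw [ih rest (x :: cur) acc hlen]
        have hsub : pvSub c x = x := if_neg (fun h' => hx h'.symm)
        simp [List.map_cons, hsub]

-- " ".join(s.split(c)) replaces every c by a space
theorem pv_join_splitOn (c : Char) (l : List Char) :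
    PySem.Chars.join [' '] (PySem.Chars.splitOn l [c]) = l.map (pvSub c) := by
  unfold PySem.Chars.splitOn
  rw [pv_go_join c (l.length + 1) l [] [] (by omega)]
  simp [PySem.Chars.join, List.intercalate]

theorem pv_filter_map_eq_flatMap {α β : Type} (F : α → β) (p : β → Bool) (g : α → List β)
    (h : ∀ a, (if p (F a) then [F a] else []) = g a) (l : List α) :
    (l.map F).filter p = l.flatMap g := by
  induction l with
  | nil => simp
  | cons a l ih =>
    simp only [List.map_cons, List.flatMap_cons, ← ih, ← h a]
    by_cases hp : p (F a) <;> simp [hp]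

-- ===== VERDICT (by name: the statement is the Claim_ definition above) =====
set_option maxHeartbeats 1000000 in
theorem remove_puntuations_spec : Claim_equal_remove_puntuations := by
  intro txt _
  unfold Spec_remove_puntuations remove_puntuations remove_puntuations_alt
  simp only [pv_join_splitOn, List.map_map]
  congr 1
  apply pv_filter_map_eq_flatMap
  intro ch
  by_cases h1 : ch = '.' ; · subst h1; decide
  by_cases h2 : ch = '!' ; · subst h2; decide
  by_cases h3 : ch = '?' ; · subst h3; decide
  by_cases h4 : ch = ':' ; · subst h4; decide
  by_cases h5 : ch = ';' ; · subst h5; decide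
  have hsub : (pvSub ';' ∘ pvSub ':' ∘ pvSub '?' ∘ pvSub '!' ∘ pvSub '.') ch = ch := by
    simp [pvSub, h1, h2, h3, h4, h5]
  simp only [Function.comp_apply] at hsub ⊢
  rw [hsub]
  rcases Bool.eq_false_or_eq_true ((PySem.Set.ofList pyPunctuation).contains ch) with hp | hp <;>
    simp [hp, h1, h2, h3, h4, h5]
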